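-- pv_equiv track=rewrite | github.com/dkqjrm/codetree-TILs | 240321/진수 to 진수/transformation-of-number-system.py | convert_ten
-- ===== SOURCE A (Python) =====
-- def convert_ten(n, a):
--     # a -> 10
--     result = 0
--     mul = 1
--     while True:
--         result += (n % 10) * mul
--         n //= 10
--         mul *= a
--         if n == 0:
--             break
--     return result
-- ===== SOURCE B (Python) =====
-- def convert_ten(n, a):
--     # Horner's method, most-significant digit first, via recursion on n // 10.
--     if n == 0:
--         return 0
--     return convert_ten(n // 10, a) * a + n % 10
-- ===== Notes on version B (the rewrite author's own statement) =====
-- stated objective: alternative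
-- what changed: Replaced the place-value accumulator loop (result/mul running products, least-significant-first) by Horner's method as a recursion convert_ten(n//10,a)*a + n%10 with base case n==0.
import Mathlib
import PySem

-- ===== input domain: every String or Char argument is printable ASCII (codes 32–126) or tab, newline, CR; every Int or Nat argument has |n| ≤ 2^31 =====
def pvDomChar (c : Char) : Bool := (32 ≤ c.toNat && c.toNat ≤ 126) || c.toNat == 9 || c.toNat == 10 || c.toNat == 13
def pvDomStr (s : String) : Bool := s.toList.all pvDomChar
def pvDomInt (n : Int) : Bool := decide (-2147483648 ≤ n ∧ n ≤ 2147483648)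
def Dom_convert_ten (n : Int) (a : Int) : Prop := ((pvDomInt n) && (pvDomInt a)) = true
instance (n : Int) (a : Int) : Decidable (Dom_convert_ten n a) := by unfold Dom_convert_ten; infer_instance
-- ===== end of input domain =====

-- B replaces A's place-value accumulator loop by Horner's method (recursion on n // 10); alternative decomposition, same cost.

-- ===== PORT A =====
-- A's while-True loop: one iteration unconditionally, then repeat while n ≠ 0.
-- Fuel n.natAbs + 1 suffices for every n ≥ 0 admitted by Pre_ (each step strictly shrinks n).
def convertTenLoopA : Nat → Int → Int → Int → Int → Int
  | 0, _, _, result, _ => result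
  | fuel + 1, n, a, result, mul =>
    let result := result + PySem.Int.mod n 10 * mul
    let n' := PySem.Int.floordiv n 10
    let mul := mul * a
    if n' = 0 then result else convertTenLoopA fuel n' a result mul

def convert_ten (n : Int) (a : Int) : Int := convertTenLoopA (n.natAbs + 1) n a 0 1

-- ===== PORT B =====
-- Horner recursion; same fuel bound makes it total in Lean (Python B recurses on n // 10 until n == 0).
def convertTenHorner : Nat → Int → Int → Int
  | 0, _, _ => 0
  | fuel + 1, n, a =>
    if n = 0 then 0
    else convertTenHorner fuel (PySem.Int.floordiv n 10) a * a + PySem.Int.mod n 10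

def convert_ten_alt (n : Int) (a : Int) : Int := convertTenHorner (n.natAbs + 1) n a

-- ===== PRECONDITION & SPEC =====
-- Pre_ excludes n < 0: there A's loop never terminates (n //= 10 floors toward -∞ and never reaches 0).
def Pre_convert_ten (n : Int) (a : Int) : Prop := 0 ≤ n
instance (n : Int) (a : Int) : Decidable (Pre_convert_ten n a) := by unfold Pre_convert_ten; infer_instance
def pvWitness_convert_ten : Int × Int := (123, 8)

def Spec_convert_ten (n : Int) (a : Int) (out : Int) : Prop := out = convert_ten_alt n a
instance (n : Int) (a : Int) (out : Int) : Decidable (Spec_convert_ten n a out) := by unfold Spec_convert_ten; infer_instance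

-- ===== CLAIM (what is proved, stated in full; the proofs are below) =====
def Claim_equal_convert_ten : Prop := ∀ (n : Int) (a : Int), Dom_convert_ten n a → Pre_convert_ten n a → Spec_convert_ten n a (convert_ten n a)

-- ===== LEMMAS AND PROOFS =====
theorem horner_zero (fuel : Nat) (a : Int) : convertTenHorner fuel 0 a = 0 := by
  cases fuel <;> simp [convertTenHorner]

theorem loopA_eq_horner (fuel : Nat) (n a result mul : Int)
    (hn : 0 ≤ n) (hf : n.natAbs < fuel) :
    convertTenLoopA fuel n a result mul = result + convertTenHorner fuel n a * mul := by
  induction fuel generalizing n result mul with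
  | zero => omega
  | succ g ih =>
    have hdiv : PySem.Int.floordiv n 10 = n / 10 :=
      PySem.Int.floordiv_eq_ediv_of_pos (by norm_num)
    have hmod : PySem.Int.mod n 10 = n % 10 :=
      PySem.Int.mod_eq_emod_of_pos (by norm_num)
    by_cases h0 : n = 0
    · subst h0
      simp [convertTenLoopA, convertTenHorner, hdiv, hmod]
    · by_cases h1 : PySem.Int.floordiv n 10 = 0
      · simp only [convertTenLoopA, convertTenHorner, if_neg h0, h1, horner_zero,
          if_true]
        ring
      · have hq0 : 0 ≤ n / 10 := Int.ediv_nonneg hn (by norm_num)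
        rw [hdiv] at h1
        have hqlt : (n / 10).natAbs < g := by omega
        simp only [convertTenLoopA, convertTenHorner, if_neg h0, hdiv, if_neg h1]
        rw [ih (n / 10) _ _ hq0 hqlt, hmod]
        ring

-- ===== VERDICT (by name: the statement is the Claim_ definition above) =====
theorem convert_ten_spec : Claim_equal_convert_ten := by
  intro n a _ hpre
  unfold Spec_convert_ten convert_ten convert_ten_alt
  rw [loopA_eq_horner _ _ _ _ _ hpre (by omega)]
  ring
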